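-- pv_equiv track=rewrite | github.com/ngoolglory/Algorithm | list1/electric_bus.py | check_electric_bus
-- ===== SOURCE A (Python) =====
-- def check_electric_bus(can_move, n_station, n_battery, battery_list):
--     pos = 0
--     charge_cnt = 0
--     while pos < n_station - can_move:
--         for i in range(pos + can_move, pos, -1):
--             if i in battery_list:
--                 charge_cnt += 1
--                 pos = i
--                 break
--         else:
--             return 0
--     return charge_cnt
-- ===== SOURCE B (Python) =====
-- def check_electric_bus(can_move, n_station, n_battery, battery_list):
--     target = n_station - can_move
--     stations = sorted(set(battery_list))
--     pos = 0
--     cnt = 0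
--     i = 0
--     while pos < target:
--         best = None
--         while i < len(stations) and stations[i] <= pos + can_move:
--             if stations[i] > pos:
--                 best = stations[i]
--             i += 1
--         if best is None:
--             return 0
--         pos = best
--         cnt += 1
--     return cnt
-- ===== Notes on version B (the rewrite author's own statement) =====
-- stated objective: alternative
-- what changed: Instead of scanning range(pos+can_move, pos, -1) and testing membership in battery_list at every step, B sorts the distinct stations once and advances a single pointer over the sorted list, taking the last station in each reachable window.
import Mathlib
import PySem

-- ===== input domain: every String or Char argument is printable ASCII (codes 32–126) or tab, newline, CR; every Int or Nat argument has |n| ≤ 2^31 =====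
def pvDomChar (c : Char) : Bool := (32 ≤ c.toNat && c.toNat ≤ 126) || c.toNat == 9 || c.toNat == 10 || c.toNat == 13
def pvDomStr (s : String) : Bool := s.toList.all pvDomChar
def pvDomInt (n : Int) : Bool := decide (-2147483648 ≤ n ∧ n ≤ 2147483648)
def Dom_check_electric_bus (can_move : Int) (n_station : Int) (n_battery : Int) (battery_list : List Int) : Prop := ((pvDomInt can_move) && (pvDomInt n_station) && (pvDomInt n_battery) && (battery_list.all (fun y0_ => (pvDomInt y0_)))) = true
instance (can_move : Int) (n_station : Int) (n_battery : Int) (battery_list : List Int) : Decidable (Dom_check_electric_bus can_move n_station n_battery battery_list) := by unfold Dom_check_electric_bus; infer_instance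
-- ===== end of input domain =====

-- B replaces A's repeated downward membership scans by one pass over sorted(set(battery_list)) with an advancing pointer; objective: alternative (different algorithm, not measured faster).


-- ===== PORT A =====
-- the 'for i in range(pos+can_move, pos, -1): if i in battery_list: … break / else: return 0' scan
def findStation (battery_list : List Int) : List Int → Option Int
  | [] => none
  | i :: rest => if i ∈ battery_list then some i else findStation battery_list rest

-- termination helper for busLoop (the found station is inside the scanned range, hence > pos)
theorem findStation_mem (battery_list : List Int) : ∀ (l : List Int) (i : Int),
    findStation battery_list l = some i → i ∈ l := by
  intro l
  induction l with
  | nil => intro i h; simp [findStation] at h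
  | cons a t ih =>
    intro i h
    simp only [findStation] at h
    split at h
    · cases h; exact List.mem_cons_self
    · exact List.mem_cons_of_mem _ (ih i h)

-- the while-loop of A
def busLoop (can_move n_station : Int) (battery_list : List Int) (pos charge_cnt : Int) : Int :=
  if h : pos < n_station - can_move then
    match hf : findStation battery_list (PySem.List.pyRange (pos + can_move) pos (-1)) with
    | some i => busLoop can_move n_station battery_list i (charge_cnt + 1)
    | none => 0
  else charge_cnt
termination_by (n_station - can_move - pos).toNat
decreasing_by
  have hm := findStation_mem battery_list _ _ hf
  rw [PySem.List.mem_pyRange_neg_one] at hm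
  omega

def check_electric_bus (can_move : Int) (n_station : Int) (n_battery : Int) (battery_list : List Int) : Int :=
  busLoop can_move n_station battery_list 0 0

-- ===== PORT B =====
-- the inner pointer-advancing while-loop of B: consume stations ≤ pos+can_move, remember the last one > pos
def scanWindow (pos lim : Int) (best : Option Int) : List Int → Option Int × List Int
  | [] => (best, [])
  | s :: rest =>
    if s ≤ lim then scanWindow pos lim (if pos < s then some s else best) rest
    else (best, s :: rest)

-- termination helper for altLoop (the chosen station is > pos)
theorem scanWindow_gt (pos lim : Int) : ∀ (st : List Int) (best : Option Int),
    (∀ b0, best = some b0 → pos < b0) →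
    ∀ b rest, scanWindow pos lim best st = (some b, rest) → pos < b := by
  intro st
  induction st with
  | nil =>
    intro best hb b rest h
    simp [scanWindow] at h
    exact hb b h.1
  | cons s t ih =>
    intro best hb b rest h
    simp only [scanWindow] at h
    split at h
    · refine ih _ ?_ b rest h
      intro b0 hb0
      split at hb0
      · cases hb0; assumption
      · exact hb b0 hb0
    · have : best = some b := (Prod.mk.injEq _ _ _ _ ▸ h).1
      exact hb b this

-- the outer while-loop of B
def altLoop (can_move target : Int) (pos cnt : Int) (stations : List Int) : Int :=
  if h : pos < target then
    match hs : scanWindow pos (pos + can_move) none stations with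
    | (some b, rest) => altLoop can_move target b (cnt + 1) rest
    | (none, _) => 0
  else cnt
termination_by (target - pos).toNat
decreasing_by
  have := scanWindow_gt pos (pos + can_move) stations none (by intro b0 h0; cases h0) b rest hs
  omega

def check_electric_bus_alt (can_move : Int) (n_station : Int) (n_battery : Int) (battery_list : List Int) : Int :=
  altLoop can_move (n_station - can_move) 0 0
    (PySem.List.sorted (PySem.Set.ofList battery_list) (fun x => x) false)

-- ===== PRECONDITION & SPEC =====
def Spec_check_electric_bus (can_move : Int) (n_station : Int) (n_battery : Int) (battery_list : List Int) (out : Int) : Prop := out = check_electric_bus_alt can_move n_station n_battery battery_list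
instance (can_move : Int) (n_station : Int) (n_battery : Int) (battery_list : List Int) (out : Int) : Decidable (Spec_check_electric_bus can_move n_station n_battery battery_list out) := by unfold Spec_check_electric_bus; infer_instance

-- ===== CLAIM (what is proved, stated in full; the proofs are below) =====
def Claim_equal_check_electric_bus : Prop := ∀ (can_move : Int) (n_station : Int) (n_battery : Int) (battery_list : List Int), Dom_check_electric_bus can_move n_station n_battery battery_list → Spec_check_electric_bus can_move n_station n_battery battery_list (check_electric_bus can_move n_station n_battery battery_list)

-- ===== LEMMAS AND PROOFS =====

-- A's downward scan returns the LARGEST battery station in (pos, pos+cm], or none if there is none.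
theorem findStation_spec (bl : List Int) (pos : Int) : ∀ (k : Nat) (a : Int), (a - pos).toNat ≤ k →
    (match findStation bl (PySem.List.pyRange a pos (-1)) with
     | some i => i ∈ bl ∧ pos < i ∧ i ≤ a ∧ (∀ x ∈ bl, pos < x → x ≤ a → x ≤ i)
     | none => ∀ x ∈ bl, ¬(pos < x ∧ x ≤ a)) := by
  intro k
  induction k with
  | zero =>
    intro a hk
    have ha : a ≤ pos := by omega
    rw [PySem.List.pyRange_neg_one_eq_nil ha]
    simp [findStation]
    intro x _ h1; omega
  | succ n ih =>
    intro a hk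
    by_cases ha : a ≤ pos
    · rw [PySem.List.pyRange_neg_one_eq_nil ha]
      simp [findStation]
      intro x _ h1; omega
    · replace ha : pos < a := by omega
      rw [PySem.List.pyRange_neg_one_cons ha]
      simp only [findStation]
      by_cases hmem : a ∈ bl
      · simp only [if_pos hmem]
        exact ⟨hmem, ha, le_refl a, fun x _ _ hx => hx⟩
      · simp only [if_neg hmem]
        have := ih (a - 1) (by omega)
        split at this
        · next i hi =>
          obtain ⟨h1, h2, h3, h4⟩ := this
          refine ⟨h1, h2, by omega, ?_⟩
          intro x hx hpx hxa
          have hxne : x ≠ a := by rintro rfl; exact hmem hx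
          exact h4 x hx hpx (by omega)
        · next hn =>
          intro x hx ⟨hpx, hxa⟩
          have hxne : x ≠ a := by rintro rfl; exact hmem hx
          exact this x hx ⟨hpx, by omega⟩

-- B's pointer advance: with a sorted station list covering all batteries > pos, it returns the same
-- maximum, and the remainder still covers all batteries beyond the new position.
theorem scanWindow_spec (pos lim : Int) (bl : List Int) : ∀ (st : List Int) (best : Option Int),
    st.Pairwise (· < ·) →
    (∀ x ∈ st, x ∈ bl) →
    (∀ x ∈ bl, pos < x → x ∈ st ∨ ∃ b0, best = some b0 ∧ x ≤ b0) →
    (∀ b0, best = some b0 → b0 ∈ bl ∧ pos < b0 ∧ b0 ≤ lim) →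
    (∀ b0, best = some b0 → ∀ x ∈ st, b0 < x) →
    (match scanWindow pos lim best st with
     | (some b, rest) => (b ∈ bl ∧ pos < b ∧ b ≤ lim ∧ (∀ x ∈ bl, pos < x → x ≤ lim → x ≤ b)) ∧
         (∀ x ∈ bl, b < x → x ∈ rest) ∧ rest.Pairwise (· < ·) ∧ (∀ x ∈ rest, x ∈ bl)
     | (none, _) => ∀ x ∈ bl, ¬(pos < x ∧ x ≤ lim)) := by
  intro st
  induction st with
  | nil =>
    intro best h1 h2 h3 h4 h5
    simp only [scanWindow]
    cases best with
    | some b =>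
      obtain ⟨hb1, hb2, hb3⟩ := h4 b rfl
      refine ⟨⟨hb1, hb2, hb3, ?_⟩, ?_, List.Pairwise.nil, by simp⟩
      · intro x hx hpx _
        rcases h3 x hx hpx with h | ⟨b0, hb0, hxb⟩
        · simp at h
        · injection hb0 with e; omega
      · intro x hx hbx
        rcases h3 x hx (by omega) with h | ⟨b0, hb0, hxb⟩
        · simp at h
        · injection hb0 with e; omega
    | none =>
      intro x hx ⟨hpx, _⟩
      rcases h3 x hx hpx with h | ⟨b0, hb0, _⟩
      · simp at h
      · simp at hb0
  | cons s t ih =>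
    intro best h1 h2 h3 h4 h5
    have hst : ∀ x ∈ t, s < x := (List.pairwise_cons.mp h1).1
    have h1t : t.Pairwise (· < ·) := (List.pairwise_cons.mp h1).2
    simp only [scanWindow]
    by_cases hsl : s ≤ lim
    · simp only [if_pos hsl]
      by_cases hps : pos < s
      · simp only [if_pos hps]
        refine ih (some s) h1t (fun x hx => h2 x (List.mem_cons_of_mem _ hx)) ?_ ?_ ?_
        · intro x hx hpx
          rcases h3 x hx hpx with h | ⟨b0, hb0, hxb⟩
          · rcases List.mem_cons.mp h with heq | h
            · exact Or.inr ⟨s, rfl, le_of_eq heq⟩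
            · exact Or.inl h
          · have hb0x := h5 b0 hb0 s List.mem_cons_self
            exact Or.inr ⟨s, rfl, by omega⟩
        · intro b0 hb0; cases hb0
          exact ⟨h2 s List.mem_cons_self, hps, hsl⟩
        · intro b0 hb0; cases hb0; exact hst
      · simp only [if_neg hps]
        refine ih best h1t (fun x hx => h2 x (List.mem_cons_of_mem _ hx)) ?_ h4 ?_
        · intro x hx hpx
          rcases h3 x hx hpx with h | hr
          · rcases List.mem_cons.mp h with rfl | h
            · omega
            · exact Or.inl h
          · exact Or.inr hr
        · intro b0 hb0 x hx
          exact h5 b0 hb0 x (List.mem_cons_of_mem _ hx)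
    · simp only [if_neg hsl]
      replace hsl : lim < s := by omega
      cases best with
      | some b =>
        obtain ⟨hb1, hb2, hb3⟩ := h4 b rfl
        have hbs : ∀ x ∈ s :: t, b < x := h5 b rfl
        refine ⟨⟨hb1, hb2, hb3, ?_⟩, ?_, h1, h2⟩
        · intro x hx hpx hxl
          rcases h3 x hx hpx with h | ⟨b0, hb0, hxb⟩
          · rcases List.mem_cons.mp h with rfl | h
            · omega
            · have := hst x h; omega
          · injection hb0 with e; omega
        · intro x hx hbx
          rcases h3 x hx (by omega) with h | ⟨b0, hb0, hxb⟩
          · exact h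
          · injection hb0 with e; omega
      | none =>
        intro x hx ⟨hpx, hxl⟩
        rcases h3 x hx hpx with h | ⟨b0, hb0, _⟩
        · rcases List.mem_cons.mp h with rfl | h
          · omega
          · have := hst x h; omega
        · simp at hb0
-- main loop equivalence, by induction on the distance to the target
theorem loop_eq (cm ns : Int) (bl : List Int) : ∀ (k : Nat) (pos cnt : Int) (st : List Int),
    (ns - cm - pos).toNat ≤ k →
    st.Pairwise (· < ·) →
    (∀ x ∈ st, x ∈ bl) →
    (∀ x ∈ bl, pos < x → x ∈ st) →
    busLoop cm ns bl pos cnt = altLoop cm (ns - cm) pos cnt st := by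
  intro k
  induction k with
  | zero =>
    intro pos cnt st hk _ _ _
    have hp : ¬ pos < ns - cm := by omega
    rw [busLoop, altLoop]
    simp [hp]
  | succ n ih =>
    intro pos cnt st hk h1 h2 h3
    rw [busLoop, altLoop]
    by_cases hp : pos < ns - cm
    · simp only [dif_pos hp]
      have hA := findStation_spec bl pos (pos + cm - pos).toNat (pos + cm) (le_refl _)
      have hB := scanWindow_spec pos (pos + cm) bl st none h1 h2
        (fun x hx hpx => Or.inl (h3 x hx hpx)) (fun b0 h => by cases h) (fun b0 h => by cases h)
      match hfa : findStation bl (PySem.List.pyRange (pos + cm) pos (-1)),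
            hfb : scanWindow pos (pos + cm) none st with
      | some i, (some b, rest) =>
        rw [hfa] at hA; rw [hfb] at hB
        obtain ⟨ha1, ha2, ha3, ha4⟩ := hA
        obtain ⟨⟨hb1, hb2, hb3, hb4⟩, hcov, hsorted, hsub⟩ := hB
        have hib : i = b := le_antisymm (hb4 i ha1 ha2 ha3) (ha4 b hb1 hb2 hb3)
        subst hib
        exact ih i (cnt + 1) rest (by omega) hsorted hsub hcov
      | some i, (none, rest) =>
        rw [hfa] at hA; rw [hfb] at hB
        obtain ⟨ha1, ha2, ha3, _⟩ := hA
        exact absurd ⟨ha2, ha3⟩ (hB i ha1)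
      | none, (some b, rest) =>
        rw [hfa] at hA; rw [hfb] at hB
        obtain ⟨⟨hb1, hb2, hb3, _⟩, _⟩ := hB
        exact absurd ⟨hb2, hb3⟩ (hA b hb1)
      | none, (none, rest) => rfl
    · simp [hp]

-- ===== VERDICT (by name: the statement is the Claim_ definition above) =====
theorem check_electric_bus_spec : Claim_equal_check_electric_bus := by
  intro cm ns nb bl _
  unfold Spec_check_electric_bus check_electric_bus check_electric_bus_alt
  exact loop_eq cm ns bl (ns - cm - 0).toNat 0 0 _ (le_refl _)
    (PySem.List.sorted_ofList_pairwise_lt bl)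
    (fun x hx => (PySem.Set.mem_ofList bl x).mp
      ((PySem.List.mem_sorted (PySem.Set.ofList bl) (fun x => x) false x).mp hx))
    (fun x hx _ => (PySem.List.mem_sorted (PySem.Set.ofList bl) (fun x => x) false x).mpr
      ((PySem.Set.mem_ofList bl x).mpr hx))
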